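-- pv_equiv track=rewrite | github.com/CHENyiru3/FDTranSearcher | architecture_indentification.py | structure_verification
-- ===== SOURCE A (Python) =====
-- def hamming_distance(str1, str2):
--     """Calculates the Hamming distance between two strings."""
--     if len(str1)!= len(str2):
--         return float('inf')  # Infinite distance if lengths don't match
--     distance = 0
--     for i in range(len(str1)):
--         if str1[i]!= str2[i]:
--             distance += 1
--     return distance
--
-- def structure_verification(seq, pattern_size=8, gap_size=2500, tir_size=5, mismatch_allowed=2):
--     seq = seq.upper()
--     seq_length = len(seq)
--     complement = {'A': 'T', 'T': 'A', 'C': 'G', 'G': 'C', 'N': 'N'}  # Simplified complement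
--
--     result = []
--
--     tsd_hash = {}
--     for i in range(seq_length - pattern_size + 1):
--         pattern = seq[i:i + pattern_size]
--         if 'N' in pattern:  # Still exclude patterns with N
--             continue
--         tsd_hash.setdefault(pattern, []).append(i)
--
--     for pattern, positions in tsd_hash.items():
--         for i in range(len(positions)):
--             for j in range(i + 1, len(positions)):
--                 tsd_start_1 = positions[i]
--                 tsd_start_2 = positions[j]
--
--                 if tsd_start_2 - (tsd_start_1 + pattern_size) >= gap_size:
--                     tir_1_start = tsd_start_1 + pattern_size
--                     tir_2_start = tsd_start_2 - tir_size
--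
--                     if tir_2_start < 0 or tir_1_start + tir_size > seq_length:
--                         continue
--
--                     tir_1 = seq[tir_1_start:tir_1_start + tir_size]
--                     tir_2 = seq[tir_2_start:tir_2_start + tir_size]
--
--                     rev_complement_tir_2 = ''.join(complement.get(base, 'N') for base in reversed(tir_2))
--
--                     if hamming_distance(tir_1, rev_complement_tir_2) <= mismatch_allowed:
--                         result.append((tsd_start_1, tsd_start_1 + pattern_size,
--                                       tir_1_start, tir_1_start + tir_size,
--                                       tsd_start_2, tsd_start_2 + pattern_size,
--                                       tir_2_start, tir_2_start + tir_size))
--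
--     return result
-- ===== SOURCE B (Python) =====
-- def _bisect_left(arr, x, lo, hi):
--     """First index k in [lo, hi] with arr[k] >= x, for arr ascending on [lo, hi)."""
--     while lo < hi:
--         mid = (lo + hi) // 2
--         if arr[mid] < x:
--             lo = mid + 1
--         else:
--             hi = mid
--     return lo
--
--
-- def structure_verification(seq, pattern_size=8, gap_size=2500, tir_size=5, mismatch_allowed=2):
--     seq = seq.upper()
--     n = len(seq)
--     complement = {'A': 'T', 'T': 'A', 'C': 'G', 'G': 'C', 'N': 'N'}
--
--     buckets = {}
--     for i in range(n - pattern_size + 1):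
--         pattern = seq[i:i + pattern_size]
--         if 'N' not in pattern:
--             buckets.setdefault(pattern, []).append(i)
--
--     result = []
--     for positions in buckets.values():
--         m = len(positions)
--         for a in range(m):
--             tsd_start_1 = positions[a]
--             tir_1_start = tsd_start_1 + pattern_size
--             # positions is strictly increasing, so the partners failing the gap
--             # test form a prefix of positions[a+1:]; binary-search past it.
--             lo = _bisect_left(positions, tir_1_start + gap_size, a + 1, m)
--             for b in range(lo, m):
--                 tsd_start_2 = positions[b]
--                 tir_2_start = tsd_start_2 - tir_size
--                 if tir_2_start < 0 or tir_1_start + tir_size > n: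
--                     continue
--                 tir_1 = seq[tir_1_start:tir_1_start + tir_size]
--                 tir_2 = seq[tir_2_start:tir_2_start + tir_size]
--                 rc = ''.join(complement.get(base, 'N') for base in reversed(tir_2))
--                 if len(tir_1) == len(rc) and sum(x != y for x, y in zip(tir_1, rc)) <= mismatch_allowed:
--                     result.append((tsd_start_1, tir_1_start,
--                                    tir_1_start, tir_1_start + tir_size,
--                                    tsd_start_2, tsd_start_2 + pattern_size,
--                                    tir_2_start, tir_2_start + tir_size))
--     return result
-- ===== Notes on version B (the rewrite author's own statement) =====
-- stated objective: alternative
-- what changed: Instead of scanning every same-pattern position pair and testing the gap condition per pair, B binary-searches (hand-rolled bisect_left, since A imports nothing) each sorted position list for the first partner satisfying the gap and iterates only from there, replacing the sentinel-based hamming helper by an inline length check plus a zip mismatch count; intended as a speed-up, measured 5-24x at mid sizes but only ~1.5x (unconfirmed) at the largest, so no speed claim is made.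
import Mathlib
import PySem

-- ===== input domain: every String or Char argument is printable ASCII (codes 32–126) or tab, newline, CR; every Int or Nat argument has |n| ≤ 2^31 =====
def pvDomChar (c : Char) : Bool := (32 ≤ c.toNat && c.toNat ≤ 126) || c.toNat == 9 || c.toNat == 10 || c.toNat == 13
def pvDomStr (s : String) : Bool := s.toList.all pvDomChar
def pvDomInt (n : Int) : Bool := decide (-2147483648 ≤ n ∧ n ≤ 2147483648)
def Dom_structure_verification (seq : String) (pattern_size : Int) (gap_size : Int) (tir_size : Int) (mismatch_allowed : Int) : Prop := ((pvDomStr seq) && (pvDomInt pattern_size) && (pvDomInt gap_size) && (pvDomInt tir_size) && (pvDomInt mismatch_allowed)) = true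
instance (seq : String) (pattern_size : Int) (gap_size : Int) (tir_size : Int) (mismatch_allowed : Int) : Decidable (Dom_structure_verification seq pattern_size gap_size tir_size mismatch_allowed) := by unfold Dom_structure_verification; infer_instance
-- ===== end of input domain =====

-- B replaces A's scan over all same-pattern position pairs by a binary search (hand-rolled
-- bisect_left) that jumps straight past the gap-failing prefix of each sorted position list;
-- objective: alternative pair enumeration (intended as faster; a timing run confirmed it only
-- at mid sizes, not at the largest, so no unqualified speed claim is made).

-- ===== PORT A =====

-- A's hamming_distance: none models the infinite distance returned when lengths differ.
def hammingDistA (str1 str2 : List Char) : Option Int :=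
  if PySem.List.len str1 ≠ PySem.List.len str2 then none
  else some ((PySem.List.pyRange 0 (PySem.List.len str1) 1).foldl
    (fun dist i =>
      if PySem.List.pyGetD str1 i ' ' ≠ PySem.List.pyGetD str2 i ' ' then dist + 1 else dist) 0)

-- '<= mismatch_allowed' on A's distance: the infinite case (none) compares False
def hamLeA (o : Option Int) (mm : Int) : Bool :=
  match o with
  | none => false
  | some dv => decide (dv ≤ mm)

def structure_verification (seq : String) (pattern_size : Int) (gap_size : Int) (tir_size : Int) (mismatch_allowed : Int) : List (List Int) :=
  let s : List Char := PySem.Chars.upper seq.toList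
  let seq_length : Int := PySem.List.len s
  let complement : PySem.Dict Char Char :=
    PySem.Dict.ofList [('A', 'T'), ('T', 'A'), ('C', 'G'), ('G', 'C'), ('N', 'N')]
  let tsd_hash : PySem.Dict (List Char) (List Int) :=
    (PySem.List.pyRange 0 (seq_length - pattern_size + 1) 1).foldl (fun d i =>
      let pattern := PySem.List.slice s (some i) (some (i + pattern_size))
      if PySem.Chars.isIn ['N'] pattern then d
      else d.modify pattern [] (fun l => l ++ [i])) PySem.Dict.empty
  tsd_hash.items.foldl (fun res pv =>
    let positions := pv.2
    let m : Int := PySem.List.len positions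
    (PySem.List.pyRange 0 m 1).foldl (fun res i =>
      (PySem.List.pyRange (i + 1) m 1).foldl (fun res j =>
        let tsd_start_1 := PySem.List.pyGetD positions i 0
        let tsd_start_2 := PySem.List.pyGetD positions j 0
        if gap_size ≤ tsd_start_2 - (tsd_start_1 + pattern_size) then
          let tir_1_start := tsd_start_1 + pattern_size
          let tir_2_start := tsd_start_2 - tir_size
          if tir_2_start < 0 ∨ seq_length < tir_1_start + tir_size then res
          else
            let tir_1 := PySem.List.slice s (some tir_1_start) (some (tir_1_start + tir_size))
            let tir_2 := PySem.List.slice s (some tir_2_start) (some (tir_2_start + tir_size))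
            let rev_complement_tir_2 := tir_2.reverse.map (fun base => complement.getD base 'N')
            if hamLeA (hammingDistA tir_1 rev_complement_tir_2) mismatch_allowed then
              res ++ [[tsd_start_1, tsd_start_1 + pattern_size,
                       tir_1_start, tir_1_start + tir_size,
                       tsd_start_2, tsd_start_2 + pattern_size,
                       tir_2_start, tir_2_start + tir_size]]
            else res
        else res) res) res) []

-- ===== PORT B =====

-- Source B's hand-written _bisect_left (while loop → structural recursion on hi - lo)
def bisectLeftB (arr : List Int) (x : Int) (lo : Int) (hi : Int) : Int :=
  if h : lo < hi then
    let mid := PySem.Int.floordiv (lo + hi) 2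
    if PySem.List.pyGetD arr mid 0 < x then bisectLeftB arr x (mid + 1) hi
    else bisectLeftB arr x lo mid
  else lo
termination_by (hi - lo).toNat
decreasing_by
  · have h1 := PySem.Int.floordiv_two_mid_bounds (le_of_lt h)
    omega
  · have h2 : PySem.Int.floordiv (lo + hi) 2 < hi := by
      rw [PySem.Int.floordiv_lt_iff_lt_mul (by omega)]; omega
    omega

def structure_verification_alt (seq : String) (pattern_size : Int) (gap_size : Int) (tir_size : Int) (mismatch_allowed : Int) : List (List Int) :=
  let s : List Char := PySem.Chars.upper seq.toList
  let n : Int := PySem.List.len s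
  let complement : PySem.Dict Char Char :=
    PySem.Dict.ofList [('A', 'T'), ('T', 'A'), ('C', 'G'), ('G', 'C'), ('N', 'N')]
  let buckets : PySem.Dict (List Char) (List Int) :=
    (PySem.List.pyRange 0 (n - pattern_size + 1) 1).foldl (fun d i =>
      let pattern := PySem.List.slice s (some i) (some (i + pattern_size))
      if !(PySem.Chars.isIn ['N'] pattern) then d.modify pattern [] (fun l => l ++ [i])
      else d) PySem.Dict.empty
  buckets.values.foldl (fun res positions =>
    let m : Int := PySem.List.len positions
    (PySem.List.pyRange 0 m 1).foldl (fun res a =>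
      let tsd_start_1 := PySem.List.pyGetD positions a 0
      let tir_1_start := tsd_start_1 + pattern_size
      let lo := bisectLeftB positions (tir_1_start + gap_size) (a + 1) m
      (PySem.List.pyRange lo m 1).foldl (fun res b =>
        let tsd_start_2 := PySem.List.pyGetD positions b 0
        let tir_2_start := tsd_start_2 - tir_size
        if tir_2_start < 0 ∨ n < tir_1_start + tir_size then res
        else
          let tir_1 := PySem.List.slice s (some tir_1_start) (some (tir_1_start + tir_size))
          let tir_2 := PySem.List.slice s (some tir_2_start) (some (tir_2_start + tir_size))
          let rc := tir_2.reverse.map (fun base => complement.getD base 'N')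
          if tir_1.length == rc.length &&
             decide ((((tir_1.zip rc).countP (fun p => p.1 != p.2) : Nat) : Int) ≤ mismatch_allowed) then
            res ++ [[tsd_start_1, tir_1_start,
                     tir_1_start, tir_1_start + tir_size,
                     tsd_start_2, tsd_start_2 + pattern_size,
                     tir_2_start, tir_2_start + tir_size]]
          else res) res) res) []

-- ===== PRECONDITION & SPEC =====
def Spec_structure_verification (seq : String) (pattern_size : Int) (gap_size : Int) (tir_size : Int) (mismatch_allowed : Int) (out : List (List Int)) : Prop := out = structure_verification_alt seq pattern_size gap_size tir_size mismatch_allowed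
instance (seq : String) (pattern_size : Int) (gap_size : Int) (tir_size : Int) (mismatch_allowed : Int) (out : List (List Int)) : Decidable (Spec_structure_verification seq pattern_size gap_size tir_size mismatch_allowed out) := by unfold Spec_structure_verification; infer_instance

-- ===== CLAIM (what is proved, stated in full; the proofs are below) =====
def Claim_equal_structure_verification : Prop := ∀ (seq : String) (pattern_size : Int) (gap_size : Int) (tir_size : Int) (mismatch_allowed : Int), Dom_structure_verification seq pattern_size gap_size tir_size mismatch_allowed → Spec_structure_verification seq pattern_size gap_size tir_size mismatch_allowed (structure_verification seq pattern_size gap_size tir_size mismatch_allowed)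

-- ===== LEMMAS AND PROOFS =====

-- the pattern starting at i
def pvPat (s : List Char) (ps i : Int) : List Char := PySem.List.slice s (some i) (some (i + ps))

-- the N-free pattern start indices, in order
def pvIdx (s : List Char) (ps : Int) : List Int :=
  (PySem.List.pyRange 0 ((s.length : Int) - ps + 1) 1).filter
    (fun i => !(PySem.Chars.isIn ['N'] (pvPat s ps i)))

-- the grouping dict both programs build
def pvDict (s : List Char) (ps : Int) : PySem.Dict (List Char) (List Int) :=
  (pvIdx s ps).foldl (fun d i => d.modify (pvPat s ps i) [] (fun l => l ++ [i])) PySem.Dict.empty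

-- the rows emitted for the pair of TSD starts (x, y), as both programs compute them
def pvEmit (s : List Char) (ps ts mm x y : Int) : List (List Int) :=
  if y - ts < 0 ∨ (s.length : Int) < x + ps + ts then []
  else
    let tir_1 := PySem.List.slice s (some (x + ps)) (some (x + ps + ts))
    let tir_2 := PySem.List.slice s (some (y - ts)) (some (y - ts + ts))
    let rc := tir_2.reverse.map (fun base =>
      (PySem.Dict.ofList [('A', 'T'), ('T', 'A'), ('C', 'G'), ('G', 'C'), ('N', 'N')]).getD base 'N')
    if tir_1.length == rc.length &&
       decide ((((tir_1.zip rc).countP (fun p => p.1 != p.2) : Nat) : Int) ≤ mm) then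
      [[x, x + ps, x + ps, x + ps + ts, y, y + ps, y - ts, y - ts + ts]]
    else []

lemma zipcount (u : List Char) : ∀ (v : List Char), u.length = v.length →
    (List.range u.length).countP (fun k => decide (u.getD k ' ' ≠ v.getD k ' ')) =
    (u.zip v).countP (fun p => p.1 != p.2) := by
  induction u with
  | nil => intro v h; simp
  | cons a u ih =>
    intro v h
    cases v with
    | nil => simp at h
    | cons b v =>
      simp only [List.length_cons, List.range_succ_eq_map, List.countP_cons, List.countP_map]
      simp only [List.zip_cons_cons, List.countP_cons]
      have := ih v (by simpa using h)
      simp only [List.getD_cons_succ, List.getD_cons_zero, Function.comp_def]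
      rw [show ((List.range u.length).countP fun k => decide (u.getD k ' ' ≠ v.getD k ' ')) = (u.zip v).countP (fun p => p.1 != p.2) from this]
      simp [bne_iff_ne, Nat.add_comm]

-- A's optional-distance hamming test equals B's zip count test
lemma ham_eq (u v : List Char) (mm : Int) :
    hamLeA (hammingDistA u v) mm =
    (u.length == v.length &&
     decide ((((u.zip v).countP (fun p => p.1 != p.2) : Nat) : Int) ≤ mm)) := by
  unfold hamLeA hammingDistA
  by_cases h : u.length = v.length
  · simp only [PySem.List.len_eq, h, ne_eq, not_true_eq_false, if_false]
    rw [PySem.List.pyRange_zero_nat, List.foldl_map]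
    have e : List.foldl (fun (x : Int) (y : Nat) => if ¬ PySem.List.pyGetD u (↑y) ' ' = PySem.List.pyGetD v (↑y) ' ' then x + 1 else x) 0 (List.range v.length)
         = 0 + ((List.range v.length).countP (fun k => decide (¬ u.getD k ' ' = v.getD k ' ')) : Int) := by
      rw [← PySem.List.foldl_ite_add_one (fun k => ¬ u.getD k ' ' = v.getD k ' ')]
      apply PySem.List.foldl_congr_mem
      intro acc k _
      simp [PySem.List.pyGetD_natCast]
    rw [e]
    have z := zipcount u v h
    rw [h] at z
    simp only [ne_eq] at z
    rw [z]
    simp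
  · rw [if_pos (by simp [h])]
    simp [h]

lemma pyGetD_mono (arr : List Int) (hs : arr.Pairwise (· ≤ ·)) (i j : Int)
    (h0 : 0 ≤ i) (hij : i ≤ j) (hj : j < (arr.length : Int)) :
    PySem.List.pyGetD arr i 0 ≤ PySem.List.pyGetD arr j 0 := by
  rw [PySem.List.pyGetD_eq_getElem arr 0 h0 (by omega), PySem.List.pyGetD_eq_getElem arr 0 (by omega) hj]
  rcases eq_or_lt_of_le hij with rfl | hlt
  · exact le_refl _
  · exact (List.pairwise_iff_getElem.1 hs) i.toNat j.toNat (by omega) (by omega) (by omega)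

-- bisectLeftB finds the first index ≥ lo whose entry is ≥ x (entries ascending)
lemma bisectLeftB_spec (arr : List Int) (x : Int) (hs : arr.Pairwise (· ≤ ·)) :
    ∀ (lo hi : Int), 0 ≤ lo → lo ≤ hi → hi ≤ (arr.length : Int) →
    lo ≤ bisectLeftB arr x lo hi ∧ bisectLeftB arr x lo hi ≤ hi ∧
    (∀ j : Int, lo ≤ j → j < bisectLeftB arr x lo hi → PySem.List.pyGetD arr j 0 < x) ∧
    (∀ j : Int, bisectLeftB arr x lo hi ≤ j → j < hi → x ≤ PySem.List.pyGetD arr j 0) := by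
  intro lo hi
  induction lo, hi using bisectLeftB.induct arr x with
  | case1 lo hi h mid hlt ih =>
    intro h0 h1 h2
    have hmid := PySem.Int.floordiv_two_mid_bounds (le_of_lt h)
    have hmidlt : mid < hi := by
      simp only [mid] at *
      rw [PySem.Int.floordiv_lt_iff_lt_mul (by omega)]; omega
    have key : bisectLeftB arr x lo hi = bisectLeftB arr x (mid + 1) hi := by
      rw [bisectLeftB]; simp only [dif_pos h]; rw [if_pos hlt]
    rw [key]
    obtain ⟨a1, a2, a3, a4⟩ := ih (by omega) (by omega) (by omega)
    refine ⟨by omega, a2, ?_, a4⟩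
    intro j hj1 hj2
    by_cases hj : j ≤ mid
    · calc PySem.List.pyGetD arr j 0 ≤ PySem.List.pyGetD arr mid 0 :=
            pyGetD_mono arr hs j mid (by omega) hj (by omega)
        _ < x := hlt
    · exact a3 j (by omega) hj2
  | case2 lo hi h mid hge ih =>
    intro h0 h1 h2
    have hmid := PySem.Int.floordiv_two_mid_bounds (le_of_lt h)
    have hmidlt : mid < hi := by
      simp only [mid] at *
      rw [PySem.Int.floordiv_lt_iff_lt_mul (by omega)]; omega
    have key : bisectLeftB arr x lo hi = bisectLeftB arr x lo mid := by
      rw [bisectLeftB]; simp only [dif_pos h]; rw [if_neg hge]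
    rw [key]
    obtain ⟨a1, a2, a3, a4⟩ := ih h0 (by omega) (by omega)
    refine ⟨a1, by omega, a3, ?_⟩
    intro j hj1 hj2
    by_cases hj : j < mid
    · exact a4 j hj1 hj
    · calc x ≤ PySem.List.pyGetD arr mid 0 := not_lt.1 hge
        _ ≤ PySem.List.pyGetD arr j 0 := pyGetD_mono arr hs mid j (by omega) (by omega) (by omega)
  | case3 lo hi h =>
    intro h0 h1 h2
    have key : bisectLeftB arr x lo hi = lo := by rw [bisectLeftB]; simp only [dif_neg h]
    rw [key]
    exact ⟨le_refl _, by omega, fun j hj1 hj2 => by omega, fun j hj1 hj2 => by omega⟩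

lemma pvDict_keys_nodup (s : List Char) (ps : Int) : (pvDict s ps).keys.Nodup := by
  unfold pvDict
  exact PySem.Dict.nodup_keys_foldl_modify_key (pvIdx s ps) (pvPat s ps) [] (fun _ i => fun l => l ++ [i]) PySem.Dict.empty (by simp [PySem.Dict.keys_empty])

lemma pvDict_getD (s : List Char) (ps : Int) (k : List Char) :
    (pvDict s ps).getD k [] = (pvIdx s ps).filter (fun i => pvPat s ps i == k) := by
  unfold pvDict
  have : (pvIdx s ps).foldl (fun d i => d.modify (pvPat s ps i) [] (fun l => l ++ [i])) PySem.Dict.empty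
       = ((pvIdx s ps).map (fun i => (pvPat s ps i, i))).foldl (fun d p => d.modify p.1 [] (fun l => l ++ [p.2])) PySem.Dict.empty := by
    rw [List.foldl_map]
  rw [this, PySem.Dict.getD_foldl_modify_append]
  simp [List.filter_map, List.map_map, Function.comp_def]

-- each bucket's position list is the filtered index list for its key
lemma pvDict_values (s : List Char) (ps : Int) {k : List Char} {v : List Int}
    (h : (k, v) ∈ (pvDict s ps).items) :
    v = (pvIdx s ps).filter (fun i => pvPat s ps i == k) := by
  rw [← pvDict_getD]
  exact (PySem.Dict.getD_of_mem_items _ h (pvDict_keys_nodup s ps) []).symm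

lemma pvIdx_sorted (s : List Char) (ps : Int) : (pvIdx s ps).Pairwise (· < ·) :=
  List.Pairwise.filter _ (PySem.List.pairwise_lt_pyRange_one _ _)

lemma buildA_eq (s : List Char) (ps : Int) :
    ((PySem.List.pyRange 0 (PySem.List.len s - ps + 1) 1).foldl (fun d i =>
      if PySem.Chars.isIn ['N'] (PySem.List.slice s (some i) (some (i + ps))) then d
      else d.modify (PySem.List.slice s (some i) (some (i + ps))) [] (fun l => l ++ [i]))
      PySem.Dict.empty) = pvDict s ps := by
  unfold pvDict pvIdx
  rw [← PySem.List.foldl_if_eq_foldl_filter]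
  simp only [PySem.List.len_eq]
  apply PySem.List.foldl_congr_mem
  intro d i _
  cases hb : PySem.Chars.isIn ['N'] (pvPat s ps i) <;> simp [pvPat] at hb ⊢ <;> simp [hb]

lemma buildB_eq (s : List Char) (ps : Int) :
    ((PySem.List.pyRange 0 (PySem.List.len s - ps + 1) 1).foldl (fun d i =>
      if !(PySem.Chars.isIn ['N'] (PySem.List.slice s (some i) (some (i + ps)))) then
        d.modify (PySem.List.slice s (some i) (some (i + ps))) [] (fun l => l ++ [i])
      else d) PySem.Dict.empty) = pvDict s ps := by
  unfold pvDict pvIdx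
  rw [← PySem.List.foldl_if_eq_foldl_filter]
  simp only [PySem.List.len_eq]
  apply PySem.List.foldl_congr_mem
  intro d i _
  rfl

-- ===== VERDICT (by name: the statement is the Claim_ definition above) =====
theorem structure_verification_spec : Claim_equal_structure_verification := by
  intro seq ps gs ts mm _
  unfold Spec_structure_verification
  unfold structure_verification structure_verification_alt
  simp only [buildA_eq, buildB_eq]
  generalize PySem.Chars.upper seq.toList = s
  simp only [PySem.List.len_eq]
  rw [show (pvDict s ps).values = (pvDict s ps).items.map (fun p => p.2) from rfl, List.foldl_map]
  apply PySem.List.foldl_congr_mem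
  rintro res ⟨k, v⟩ hkv
  dsimp only
  have hv : v.Pairwise (· < ·) := by
    rw [pvDict_values s ps hkv]
    exact (pvIdx_sorted s ps).filter _
  have hvle : v.Pairwise (· ≤ ·) := hv.imp le_of_lt
  apply PySem.List.foldl_congr_mem
  intro res2 a ha
  obtain ⟨ha0, ham⟩ := (PySem.List.mem_pyRange_one).1 ha
  obtain ⟨b1, b2, b3, b4⟩ := bisectLeftB_spec v (PySem.List.pyGetD v a 0 + ps + gs) hvle
    (a + 1) (v.length : Int) (by omega) (by omega) (by omega)
  trans (res2 ++ (PySem.List.pyRange (a + 1) (v.length : Int) 1).flatMap (fun j =>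
      if gs ≤ PySem.List.pyGetD v j 0 - (PySem.List.pyGetD v a 0 + ps) then
        pvEmit s ps ts mm (PySem.List.pyGetD v a 0) (PySem.List.pyGetD v j 0) else []))
  · rw [← PySem.List.foldl_append_eq_flatMap]
    apply PySem.List.foldl_congr_mem
    intro acc j _
    rw [ham_eq]
    simp only [pvEmit]
    split_ifs <;> simp
  trans (res2 ++ (PySem.List.pyRange (bisectLeftB v (PySem.List.pyGetD v a 0 + ps + gs) (a + 1) (v.length : Int)) (v.length : Int) 1).flatMap (fun j =>
      pvEmit s ps ts mm (PySem.List.pyGetD v a 0) (PySem.List.pyGetD v j 0)))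
  · congr 1
    rw [PySem.List.pyRange_one_append (a + 1) _ _ b1 b2, List.flatMap_append]
    have h1 : (PySem.List.pyRange (a + 1) (bisectLeftB v (PySem.List.pyGetD v a 0 + ps + gs) (a + 1) (v.length : Int)) 1).flatMap (fun j =>
        if gs ≤ PySem.List.pyGetD v j 0 - (PySem.List.pyGetD v a 0 + ps) then
          pvEmit s ps ts mm (PySem.List.pyGetD v a 0) (PySem.List.pyGetD v j 0) else []) = [] := by
      apply List.flatMap_eq_nil_iff.mpr
      intro j hj
      obtain ⟨hj1, hj2⟩ := (PySem.List.mem_pyRange_one).1 hj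
      have := b3 j hj1 hj2
      rw [if_neg (by omega)]
    rw [h1, List.nil_append]
    apply List.flatMap_congr
    intro j hj
    obtain ⟨hj1, hj2⟩ := (PySem.List.mem_pyRange_one).1 hj
    have := b4 j hj1 hj2
    rw [if_pos (by omega)]
  · rw [← PySem.List.foldl_append_eq_flatMap]
    apply PySem.List.foldl_congr_mem
    intro acc j _
    simp only [pvEmit]
    split_ifs <;> simp
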